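-- pv_equiv track=rewrite | github.com/amitgit2020/NPTEL-Python-DSA-2020 | Week-4/Assignment.py | onehop
-- ===== SOURCE A (Python) =====
-- def onehop(l):
--     direct = {}
--     for (i,j) in l:
--         if i in direct.keys():
--             direct[i].append(j)
--         else:
--             direct[i] = [j]
--
--     hopping = []
--
--     for src in direct.keys():
--         for dest in direct[src]:
--             if dest in direct.keys():
--                 for remote in direct[dest]:
--                     if src != remote:
--                         hopping.append((src,remote))
--
--     return(remdup(sorted(hopping)))
--
-- def remdup(l):
--     if len(l) < 2:
--         return(l)
--
--     if l[0] != l[1]: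
--         return(l[0:1]+remdup(l[1:]))
--     else:
--         return(remdup(l[1:]))
-- ===== SOURCE B (Python) =====
-- def onehop(l):
--     # Direct double scan over edge pairs, no adjacency index.
--     return sorted({(a, d) for (a, b) in l for (c, d) in l if b == c and a != d})
-- ===== Notes on version B (the rewrite author's own statement) =====
-- stated objective: simpler
-- what changed: Replaces the adjacency-dict build plus index-and-walk traversal and a recursive remdup with a one-line set comprehension over all ordered pairs of edges followed by sorted(), letting the set do the dedup.
import Mathlib
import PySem

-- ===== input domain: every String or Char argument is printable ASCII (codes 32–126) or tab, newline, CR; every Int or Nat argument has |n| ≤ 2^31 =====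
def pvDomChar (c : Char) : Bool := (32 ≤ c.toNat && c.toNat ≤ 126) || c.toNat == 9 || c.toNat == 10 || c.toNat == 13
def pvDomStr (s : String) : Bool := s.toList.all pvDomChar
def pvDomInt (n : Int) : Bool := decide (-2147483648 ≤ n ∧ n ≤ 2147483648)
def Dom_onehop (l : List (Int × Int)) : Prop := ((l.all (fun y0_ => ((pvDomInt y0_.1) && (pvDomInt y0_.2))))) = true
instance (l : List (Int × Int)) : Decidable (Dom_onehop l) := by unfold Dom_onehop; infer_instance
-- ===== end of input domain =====

-- B replaces the adjacency-dict build + index-and-walk + recursive remdup of A by a direct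
-- set comprehension over all ordered pairs of edges followed by sorted() (objective: simpler).

-- ===== PORT A =====
-- remdup: the Python recursion on slices (len<2 test, l[0] vs l[1], l[0:1]+remdup(l[1:]))
-- rendered as the equivalent structural match (l[1:] is the tail).
def remdup : List (Int × Int) → List (Int × Int)
  | [] => []
  | [a] => [a]
  | a :: b :: t => if a ≠ b then a :: remdup (b :: t) else remdup (b :: t)

def onehop (l : List (Int × Int)) : List (Int × Int) :=
  let direct := l.foldl (fun d ij =>
      if d.contains ij.1 then d.modify ij.1 [] (fun xs => xs ++ [ij.2])  -- direct[i].append(j)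
      else d.insert ij.1 [ij.2]) PySem.Dict.empty
  let hopping := direct.keys.foldl (fun acc src =>
      (direct.getD src []).foldl (fun acc dest =>
        if direct.contains dest then
          (direct.getD dest []).foldl (fun acc remote =>
            if src ≠ remote then acc ++ [(src, remote)] else acc) acc
        else acc) acc) []
  -- Python's keyless sorted on tuples compares lexicographically: key = toLex (identity into the lex order)
  remdup (PySem.List.sorted hopping (fun p => toLex p) false)

-- ===== PORT B =====
def onehop_alt (l : List (Int × Int)) : List (Int × Int) :=
  -- {(a,d) for (a,b) in l for (c,d) in l if b == c and a != d}, built in iteration order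
  let result := PySem.Set.ofList (l.flatMap (fun ab =>
      l.flatMap (fun cd => if ab.2 = cd.1 ∧ ab.1 ≠ cd.2 then [(ab.1, cd.2)] else [])))
  PySem.List.sorted result (fun p => toLex p) false

-- ===== PRECONDITION & SPEC =====
def Spec_onehop (l : List (Int × Int)) (out : List (Int × Int)) : Prop := out = onehop_alt l
instance (l : List (Int × Int)) (out : List (Int × Int)) : Decidable (Spec_onehop l out) := by unfold Spec_onehop; infer_instance

-- ===== CLAIM (what is proved, stated in full; the proofs are below) =====
def Claim_equal_onehop : Prop := ∀ (l : List (Int × Int)), Dom_onehop l → Spec_onehop l (onehop l)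

-- ===== LEMMAS AND PROOFS =====

theorem mem_remdup {x : Int × Int} : ∀ {xs : List (Int × Int)}, x ∈ remdup xs ↔ x ∈ xs := by
  intro xs
  induction xs with
  | nil => simp [remdup]
  | cons a t ih =>
    cases t with
    | nil => simp [remdup]
    | cons b t' =>
      by_cases h : a = b
      · subst h
        simp only [remdup, ne_eq, not_true_eq_false, if_false]
        rw [ih]
        simp
      · simp only [remdup, ne_eq, h, not_false_eq_true, if_true, List.mem_cons]
        rw [ih]
        simp

theorem pairwise_lt_remdup : ∀ {xs : List (Int × Int)},
    xs.Pairwise (fun a b => toLex a ≤ toLex b) →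
    (remdup xs).Pairwise (fun a b => toLex a < toLex b) := by
  intro xs
  induction xs with
  | nil => intro _; simp [remdup]
  | cons a t ih =>
    intro hp
    cases t with
    | nil => simp [remdup]
    | cons b t' =>
      rcases List.pairwise_cons.mp hp with ⟨hab, hbt⟩
      by_cases h : a = b
      · subst h
        simpa [remdup] using ih hbt
      · simp only [remdup, ne_eq, h, not_false_eq_true, if_true]
        refine List.pairwise_cons.mpr ⟨?_, ih hbt⟩
        intro y hy
        have hyb : y ∈ b :: t' := mem_remdup.mp hy
        have halt : toLex a < toLex b := lt_of_le_of_ne (hab b (by simp)) (by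
          intro he; exact h (toLex.injective he))
        rcases List.mem_cons.mp hyb with rfl | hyt'
        · exact halt
        · exact lt_of_lt_of_le halt (List.pairwise_cons.mp hbt |>.1 y hyt')

theorem nodup_of_pairwise_lt {xs : List (Int × Int)}
    (h : xs.Pairwise (fun a b => toLex a < toLex b)) : xs.Nodup := by
  refine List.Pairwise.imp ?_ h
  intro a b hab he
  subst he
  exact lt_irrefl _ hab

-- The dict-building step of A
def pvStep (d : PySem.Dict Int (List Int)) (ij : Int × Int) : PySem.Dict Int (List Int) :=
  if d.contains ij.1 then d.modify ij.1 [] (fun xs => xs ++ [ij.2]) else d.insert ij.1 [ij.2]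

theorem getD_pvStep (d : PySem.Dict Int (List Int)) (p : Int × Int) (i : Int) :
    (pvStep d p).getD i [] = if i = p.1 then d.getD p.1 [] ++ [p.2] else d.getD i [] := by
  unfold pvStep
  by_cases hc : d.contains p.1 = true
  · simp [hc, PySem.Dict.getD_modify]
  · have hz : d.getD p.1 [] = [] :=
      PySem.Dict.getD_of_not_contains d [] (by simpa using hc)
    simp [hc, PySem.Dict.getD_insert, hz]

theorem contains_pvStep (d : PySem.Dict Int (List Int)) (p : Int × Int) (i : Int) :
    (pvStep d p).contains i = (i == p.1 || d.contains i) := by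
  unfold pvStep
  by_cases hc : d.contains p.1 = true
  · rw [if_pos hc, PySem.Dict.contains_modify]
  · rw [if_neg hc, PySem.Dict.contains_insert]

theorem getD_build (l : List (Int × Int)) :
    ∀ (d : PySem.Dict Int (List Int)) (i j : Int),
    (j ∈ (l.foldl pvStep d).getD i [] ↔ j ∈ d.getD i [] ∨ (i, j) ∈ l) := by
  induction l with
  | nil => simp
  | cons p t ih =>
    intro d i j
    obtain ⟨p1, p2⟩ := p
    simp only [List.foldl_cons]
    rw [ih, getD_pvStep]
    by_cases h : i = p1
    · subst h
      simp only [if_true, List.mem_append, List.mem_cons,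
        Prod.mk.injEq, true_and]
      tauto
    · simp only [if_neg h, List.mem_cons, Prod.mk.injEq]
      have : ¬ (i = p1 ∧ j = p2) := fun hh => h hh.1
      tauto

theorem contains_build (l : List (Int × Int)) :
    ∀ (d : PySem.Dict Int (List Int)) (i : Int),
    ((l.foldl pvStep d).contains i = true ↔ d.contains i = true ∨ ∃ j, (i, j) ∈ l) := by
  induction l with
  | nil => simp
  | cons p t ih =>
    intro d i
    obtain ⟨p1, p2⟩ := p
    simp only [List.foldl_cons]
    rw [ih, contains_pvStep]
    simp only [Bool.or_eq_true, beq_iff_eq, List.mem_cons, Prod.mk.injEq]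
    constructor
    · rintro ((rfl | hc) | ⟨j, hj⟩)
      · exact Or.inr ⟨p2, Or.inl ⟨rfl, rfl⟩⟩
      · exact Or.inl hc
      · exact Or.inr ⟨j, Or.inr hj⟩
    · rintro (hc | ⟨j, (⟨rfl, rfl⟩ | hj)⟩)
      · exact Or.inl (Or.inr hc)
      · exact Or.inl (Or.inl rfl)
      · exact Or.inr ⟨j, hj⟩

-- membership characterisation of A's `hopping` list
theorem mem_hopping (l : List (Int × Int)) (x : Int × Int) :
    (x ∈ (let direct := l.foldl pvStep PySem.Dict.empty;
      direct.keys.foldl (fun acc src =>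
      (direct.getD src []).foldl (fun acc dest =>
        if direct.contains dest then
          (direct.getD dest []).foldl (fun acc remote =>
            if src ≠ remote then acc ++ [(src, remote)] else acc) acc
        else acc) acc) ([] : List (Int × Int)))) ↔
    ∃ m, (x.1, m) ∈ l ∧ (m, x.2) ∈ l ∧ x.1 ≠ x.2 := by
  set D := l.foldl pvStep PySem.Dict.empty with hD
  have inner : ∀ (src dest : Int) (acc : List (Int × Int)),
      (D.getD dest []).foldl (fun acc remote =>
        if src ≠ remote then acc ++ [(src, remote)] else acc) acc
      = acc ++ ((D.getD dest []).filter (fun r => decide (src ≠ r))).map (fun r => (src, r)) := by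
    intro src dest acc
    exact PySem.List.foldl_append_ite _ _ _ _
  have mid : ∀ (src : Int) (acc : List (Int × Int)),
      (D.getD src []).foldl (fun acc dest =>
        if D.contains dest then
          (D.getD dest []).foldl (fun acc remote =>
            if src ≠ remote then acc ++ [(src, remote)] else acc) acc
        else acc) acc
      = acc ++ (D.getD src []).flatMap (fun dest =>
          if D.contains dest then
            ((D.getD dest []).filter (fun r => decide (src ≠ r))).map (fun r => (src, r))
          else []) := by
    intro src acc
    rw [← PySem.List.foldl_append_eq_flatMap]
    apply PySem.List.foldl_congr_mem
    intro a d _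
    by_cases h : D.contains d
    · simp only [h, if_true]; exact inner src d a
    · simp [h]
  have outer :
      D.keys.foldl (fun acc src =>
      (D.getD src []).foldl (fun acc dest =>
        if D.contains dest then
          (D.getD dest []).foldl (fun acc remote =>
            if src ≠ remote then acc ++ [(src, remote)] else acc) acc
        else acc) acc) ([] : List (Int × Int))
      = D.keys.flatMap (fun src => (D.getD src []).flatMap (fun dest =>
          if D.contains dest then
            ((D.getD dest []).filter (fun r => decide (src ≠ r))).map (fun r => (src, r))
          else [])) := by
    have h1 := PySem.List.foldl_congr_mem D.keys _
      (fun acc src => acc ++ (D.getD src []).flatMap (fun dest =>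
          if D.contains dest then
            ((D.getD dest []).filter (fun r => decide (src ≠ r))).map (fun r => (src, r))
          else [])) ([] : List (Int × Int)) (fun a s _ => mid s a)
    rw [h1, PySem.List.foldl_append_eq_flatMap, List.nil_append]
  simp only []
  rw [outer]
  have hgetD : ∀ i j : Int, j ∈ D.getD i [] ↔ (i, j) ∈ l := by
    intro i j
    rw [hD, getD_build]
    simp
  have hcont : ∀ i : Int, D.contains i = true ↔ ∃ j, (i, j) ∈ l := by
    intro i
    rw [hD, contains_build]
    simp
  have hkeys : ∀ i : Int, i ∈ D.keys ↔ ∃ j, (i, j) ∈ l := by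
    intro i
    rw [← PySem.Dict.contains_iff_mem_keys]
    exact hcont i
  constructor
  · intro hx
    rcases List.mem_flatMap.mp hx with ⟨src, hsrc, hx2⟩
    rcases List.mem_flatMap.mp hx2 with ⟨dest, hdest, hx3⟩
    by_cases hc : D.contains dest
    · rw [if_pos hc] at hx3
      rcases List.mem_map.mp hx3 with ⟨r, hr, rfl⟩
      have hr2 := List.mem_filter.mp hr
      refine ⟨dest, ?_, ?_, ?_⟩
      · exact (hgetD src dest).mp hdest
      · exact (hgetD dest r).mp hr2.1
      · simpa using hr2.2
    · rw [if_neg hc] at hx3; simp at hx3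
  · rintro ⟨m, h1, h2, hne⟩
    refine List.mem_flatMap.mpr ⟨x.1, (hkeys x.1).mpr ⟨m, h1⟩, ?_⟩
    refine List.mem_flatMap.mpr ⟨m, (hgetD x.1 m).mpr h1, ?_⟩
    rw [if_pos ((hcont m).mpr ⟨x.2, h2⟩)]
    refine List.mem_map.mpr ⟨x.2, List.mem_filter.mpr ⟨(hgetD m x.2).mpr h2, by simpa using hne⟩, ?_⟩
    rfl

theorem mem_pairsB (l : List (Int × Int)) (x : Int × Int) :
    (x ∈ l.flatMap (fun ab =>
      l.flatMap (fun cd => if ab.2 = cd.1 ∧ ab.1 ≠ cd.2 then [(ab.1, cd.2)] else []))) ↔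
    ∃ m, (x.1, m) ∈ l ∧ (m, x.2) ∈ l ∧ x.1 ≠ x.2 := by
  constructor
  · intro hx
    rcases List.mem_flatMap.mp hx with ⟨ab, hab, hx2⟩
    rcases List.mem_flatMap.mp hx2 with ⟨cd, hcd, hx3⟩
    by_cases hc : ab.2 = cd.1 ∧ ab.1 ≠ cd.2
    · rw [if_pos hc] at hx3
      rcases List.mem_singleton.mp hx3 with rfl
      exact ⟨ab.2, by simpa using hab, by simpa [hc.1] using hcd, hc.2⟩
    · rw [if_neg hc] at hx3; simp at hx3
  · rintro ⟨m, h1, h2, hne⟩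
    refine List.mem_flatMap.mpr ⟨(x.1, m), h1, ?_⟩
    refine List.mem_flatMap.mpr ⟨(m, x.2), h2, ?_⟩
    simp [hne]

-- ===== VERDICT (by name: the statement is the Claim_ definition above) =====
theorem onehop_spec : Claim_equal_onehop := by
  intro l _
  unfold Spec_onehop onehop onehop_alt
  simp only []
  set D := l.foldl (fun d (ij : Int × Int) =>
      if d.contains ij.1 then d.modify ij.1 [] (fun xs => xs ++ [ij.2])
      else d.insert ij.1 [ij.2]) PySem.Dict.empty with hDdef
  have hDstep : D = l.foldl pvStep PySem.Dict.empty := by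
    rw [hDdef]; rfl
  set hopping := D.keys.foldl (fun acc src =>
      (D.getD src []).foldl (fun acc dest =>
        if D.contains dest then
          (D.getD dest []).foldl (fun acc remote =>
            if src ≠ remote then acc ++ [(src, remote)] else acc) acc
        else acc) acc) ([] : List (Int × Int)) with hhop
  set pairs := l.flatMap (fun ab =>
      l.flatMap (fun cd => if ab.2 = cd.1 ∧ ab.1 ≠ cd.2 then [(ab.1, cd.2)] else [])) with hpairs
  have hmemh : ∀ x, x ∈ hopping ↔ ∃ m, (x.1, m) ∈ l ∧ (m, x.2) ∈ l ∧ x.1 ≠ x.2 := by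
    intro x
    rw [hhop, hDstep]
    exact mem_hopping l x
  -- the sorted-then-remdup list on A's side
  set ys := remdup (PySem.List.sorted hopping (fun p => toLex p) false) with hys
  have hys_pw : ys.Pairwise (fun a b => toLex a < toLex b) :=
    pairwise_lt_remdup (PySem.List.sorted_pairwise _ _)
  have hys_nodup : ys.Nodup := nodup_of_pairwise_lt hys_pw
  have hys_mem : ∀ x, x ∈ ys ↔ ∃ m, (x.1, m) ∈ l ∧ (m, x.2) ∈ l ∧ x.1 ≠ x.2 := by
    intro x
    rw [hys, mem_remdup, PySem.List.mem_sorted]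
    exact hmemh x
  have hperm : ys.Perm (PySem.Set.ofList pairs) := by
    rw [List.perm_ext_iff_of_nodup hys_nodup (PySem.Set.nodup_ofList _)]
    intro x
    rw [hys_mem, PySem.Set.mem_ofList, hpairs]
    exact (mem_pairsB l x).symm
  exact (PySem.List.sorted_eq_of_perm_of_pairwise_lt _ _ _ hperm hys_pw).symm
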